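-- pv_equiv track=rewrite | github.com/alstn113/algorithm | 프로그래머스/unrated/181874. A 강조하기/A 강조하기.py | solution
-- ===== SOURCE A (Python) =====
-- def solution(myString):
--     answer = ""
--     for s in myString:
--         if s == "a":
--             answer += "A"
--         elif s != "A":
--             answer += s.lower()
--         else:
--             answer += s
--     return answer
-- ===== SOURCE B (Python) =====
-- def solution(myString):
--     return myString.lower().replace("a", "A")
-- ===== Notes on version B (the rewrite author's own statement) =====
-- stated objective: simpler
-- what changed: Replaces the per-character branching accumulator loop with two whole-string passes: lowercase the string, then replace every lowercase letter a by its uppercase form.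
import Mathlib
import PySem

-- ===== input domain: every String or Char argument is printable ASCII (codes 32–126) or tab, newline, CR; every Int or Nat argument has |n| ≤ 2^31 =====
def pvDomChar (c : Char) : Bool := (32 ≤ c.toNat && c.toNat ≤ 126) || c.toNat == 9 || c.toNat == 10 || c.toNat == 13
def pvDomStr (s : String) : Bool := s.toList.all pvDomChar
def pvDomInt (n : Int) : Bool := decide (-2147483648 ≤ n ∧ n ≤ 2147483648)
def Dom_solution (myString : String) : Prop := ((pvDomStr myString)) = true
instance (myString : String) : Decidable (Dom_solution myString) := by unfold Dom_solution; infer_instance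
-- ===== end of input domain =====

-- B replaces A's per-character branching accumulator loop by two whole-string passes (lower, then replace "a"→"A"); simpler, same result.


-- ===== PORT A =====
-- loop over the characters, appending to 'answer' with the same three branches as A
def solution (myString : String) : String :=
  String.ofList (myString.toList.foldl (fun answer s =>
    if s = 'a' then answer ++ ['A']
    else if s ≠ 'A' then answer ++ [PySem.Chars.lowerChar s]
    else answer ++ [s]) [])

-- ===== PORT B =====
def solution_alt (myString : String) : String :=
  PySem.Str.replace (PySem.Str.lower myString) "a" "A"

-- ===== PRECONDITION & SPEC =====
def Spec_solution (myString : String) (out : String) : Prop := out = solution_alt myString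
instance (myString : String) (out : String) : Decidable (Spec_solution myString out) := by unfold Spec_solution; infer_instance

-- ===== CLAIM (what is proved, stated in full; the proofs are below) =====
def Claim_equal_solution : Prop := ∀ (myString : String), Dom_solution myString → Spec_solution myString (solution myString)

-- ===== LEMMAS AND PROOFS =====

-- the combined effect of A's three branches on one character
def pvStep (c : Char) : Char :=
  if c = 'a' then 'A' else if c ≠ 'A' then PySem.Chars.lowerChar c else c

-- replacing the single character 'a' by 'A' is a pointwise map (loop of PySem.Chars.replace)
lemma replace_go_a (fuel : Nat) : ∀ (l acc : List Char), l.length ≤ fuel →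
    PySem.Chars.replace.go ['a'] ['A'] fuel l acc
      = acc.reverse ++ l.map (fun c => if c = 'a' then 'A' else c) := by
  induction fuel with
  | zero =>
    intro l acc h
    have : l = [] := List.eq_nil_of_length_eq_zero (Nat.le_zero.mp h)
    subst this; simp [PySem.Chars.replace.go]
  | succ n ih =>
    intro l acc h
    cases l with
    | nil => simp [PySem.Chars.replace.go]
    | cons c t =>
      by_cases hc : c = 'a'
      · subst hc
        rw [show PySem.Chars.replace.go ['a'] ['A'] (n+1) ('a' :: t) acc
              = PySem.Chars.replace.go ['a'] ['A'] n t ('A' :: acc) by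
            simp [PySem.Chars.replace.go, List.isPrefixOf]]
        rw [ih t _ (by simpa using h)]
        simp
      · rw [show PySem.Chars.replace.go ['a'] ['A'] (n+1) (c :: t) acc
              = PySem.Chars.replace.go ['a'] ['A'] n t (c :: acc) by
            simp [PySem.Chars.replace.go, List.isPrefixOf, Ne.symm hc]]
        rw [ih t _ (by simpa using h)]
        simp [hc]

lemma replace_a (l : List Char) :
    PySem.Chars.replace l ['a'] ['A'] = l.map (fun c => if c = 'a' then 'A' else c) := by
  rw [PySem.Chars.replace]
  simp only [List.isEmpty_cons, if_false, Bool.false_eq_true]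
  exact replace_go_a l.length l [] (le_refl _)

-- A's branch result equals lowercase-then-fix-'a', character by character
lemma pvStep_eq (c : Char) :
    pvStep c = (if PySem.Chars.lowerChar c = 'a' then 'A' else PySem.Chars.lowerChar c) := by
  unfold pvStep PySem.Chars.lowerChar
  by_cases hca : c = 'a'
  · subst hca; decide
  · by_cases hcA : c = 'A'
    · subst hcA; decide
    · simp only [hca, hcA, if_false, ne_eq, not_false_iff, if_true]
      split_ifs with hu hl
      · exfalso
        apply hcA
        simp only [PySem.Chars.isupper, Bool.and_eq_true, decide_eq_true_eq] at hu
        obtain ⟨h1, h2⟩ := hu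
        have hb1 : 65 ≤ c.toNat := h1
        have hb2 : c.toNat ≤ 90 := h2
        have hv : (Char.ofNat (c.toNat + 32)).toNat = c.toNat + 32 := by
          rw [Char.ofNat, dif_pos]
          · rfl
          · exact Or.inl (by omega)
        rw [hl] at hv
        have hn : c.toNat = 65 := by simpa using hv.symm
        apply Char.ext
        apply UInt32.toNat_inj.mp
        show c.toNat = ('A' : Char).val.toNat
        rw [hn]; rfl
      · rfl
      · rfl

theorem solution_spec_aux (myString : String) :
    solution myString = solution_alt myString := by
  unfold solution solution_alt
  have hstep : (fun (answer : List Char) (s : Char) =>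
      if s = 'a' then answer ++ ['A']
      else if s ≠ 'A' then answer ++ [PySem.Chars.lowerChar s]
      else answer ++ [s]) = fun answer s => answer ++ [pvStep s] := by
    funext answer s; unfold pvStep; split_ifs <;> rfl
  rw [hstep, PySem.List.foldl_append_singleton_eq_map]
  have hR : PySem.Str.replace (PySem.Str.lower myString) "a" "A"
      = String.ofList (PySem.Chars.replace (PySem.Chars.lower myString.toList) ['a'] ['A']) := by
    apply String.toList_injective
    simp [PySem.Str.toList_replace, PySem.Str.toList_lower]
  rw [hR, replace_a, PySem.Chars.lower, List.map_map]
  congr 1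
  simp only [List.nil_append]
  exact List.map_congr_left (fun c _ => pvStep_eq c)

-- ===== VERDICT (by name: the statement is the Claim_ definition above) =====
theorem solution_spec : Claim_equal_solution := by
  intro s _; exact solution_spec_aux s
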